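-- pv_equiv track=rewrite | github.com/opensculpt/opensculpt | agos/serve.py | _detect_provider_from_key
-- ===== SOURCE A (Python) =====
-- def _detect_provider_from_key(api_key: str) -> str | None:
--     """Auto-detect LLM provider from API key prefix."""
--     if not api_key:
--         return None
--     prefixes = {
--         "sk-ant-": "anthropic",
--         "sk-or-": "openrouter",
--         "sk-proj-": "openai",
--         "sk-": "openai",      # generic OpenAI
--         "gsk_": "groq",
--         "xai-": "xai",
--         "pplx-": "perplexity",
--         "r8_": "replicate",
--     }
--     for prefix, provider in prefixes.items():
--         if api_key.startswith(prefix):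
--             return provider
--     return None
-- ===== SOURCE B (Python) =====
-- _PAIRS = [
--     ("sk-ant-", "anthropic"),
--     ("sk-or-", "openrouter"),
--     ("sk-proj-", "openai"),
--     ("sk-", "openai"),
--     ("gsk_", "groq"),
--     ("xai-", "xai"),
--     ("pplx-", "perplexity"),
--     ("r8_", "replicate"),
-- ]
--
--
-- def _detect_provider_from_key(api_key: str) -> str | None:
--     """Auto-detect LLM provider from API key prefix (longest matching prefix wins)."""
--     if not api_key:
--         return None
--     matches = [(p, prov) for p, prov in _PAIRS if api_key.startswith(p)]
--     if not matches:
--         return None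
--     return max(matches, key=lambda t: len(t[0]))[1]
-- ===== Notes on version B (the rewrite author's own statement) =====
-- stated objective: idiomatic
-- what changed: Replaced A's order-sensitive first-match scan over a hand-ordered dict with an order-independent longest-matching-prefix selection over a list of (prefix, provider) pairs: collect all matching pairs, then take the one with the longest prefix.
import Mathlib
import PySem

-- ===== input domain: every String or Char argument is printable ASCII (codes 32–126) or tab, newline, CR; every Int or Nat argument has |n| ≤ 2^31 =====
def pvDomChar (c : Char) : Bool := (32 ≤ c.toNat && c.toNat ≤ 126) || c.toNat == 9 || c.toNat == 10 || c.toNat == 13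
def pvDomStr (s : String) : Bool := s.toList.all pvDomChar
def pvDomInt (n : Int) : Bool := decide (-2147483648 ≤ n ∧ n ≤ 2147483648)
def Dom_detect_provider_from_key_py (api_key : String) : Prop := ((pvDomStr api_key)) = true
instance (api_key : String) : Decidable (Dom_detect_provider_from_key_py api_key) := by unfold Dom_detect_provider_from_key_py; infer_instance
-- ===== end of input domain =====

-- B replaces A's order-sensitive first-match scan over a hand-ordered dict with an order-independent longest-matching-prefix selection (idiomatic; same result).

-- ===== PORT A =====
-- the dict literal of A, in insertion order
def pvPrefixesA : List (String × String) :=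
  [("sk-ant-", "anthropic"), ("sk-or-", "openrouter"), ("sk-proj-", "openai"),
   ("sk-", "openai"), ("gsk_", "groq"), ("xai-", "xai"),
   ("pplx-", "perplexity"), ("r8_", "replicate")]

-- the `for prefix, provider in prefixes.items(): if api_key.startswith(prefix): return provider` loop
def pvFirstMatch (api_key : String) : List (String × String) → Option String
  | [] => none
  | (p, prov) :: rest =>
      if PySem.Str.startswith api_key p then some prov else pvFirstMatch api_key rest

def detect_provider_from_key_py (api_key : String) : Option String :=
  if api_key = "" then none
  else pvFirstMatch api_key pvPrefixesA

-- ===== PORT B =====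
def pvPairsB : List (String × String) :=
  [("sk-ant-", "anthropic"), ("sk-or-", "openrouter"), ("sk-proj-", "openai"),
   ("sk-", "openai"), ("gsk_", "groq"), ("xai-", "xai"),
   ("pplx-", "perplexity"), ("r8_", "replicate")]

def detect_provider_from_key_py_alt (api_key : String) : Option String :=
  if api_key = "" then none
  else
    let ms := pvPairsB.filter (fun t => PySem.Str.startswith api_key t.1)
    match PySem.List.max? ms (fun t => PySem.Str.len t.1) with
    | none => none
    | some t => some t.2

-- ===== PRECONDITION & SPEC =====
def Spec_detect_provider_from_key_py (api_key : String) (out : Option String) : Prop := out = detect_provider_from_key_py_alt api_key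
instance (api_key : String) (out : Option String) : Decidable (Spec_detect_provider_from_key_py api_key out) := by unfold Spec_detect_provider_from_key_py; infer_instance

-- ===== CLAIM (what is proved, stated in full; the proofs are below) =====
def Claim_equal_detect_provider_from_key_py : Prop := ∀ (api_key : String), Dom_detect_provider_from_key_py api_key → Spec_detect_provider_from_key_py api_key (detect_provider_from_key_py api_key)

-- ===== LEMMAS AND PROOFS =====

-- if s starts with p and q is a prefix of p, then s starts with q
theorem pv_sw_of_prefix (s p q : String) (hp : PySem.Str.startswith s p = true)
    (hq : q.toList <+: p.toList) : PySem.Str.startswith s q = true := by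
  rw [PySem.Str.startswith_eq, PySem.Chars.startswith_iff] at hp ⊢
  exact hq.trans hp

-- two prefixes of the same string are always comparable
theorem pv_prefix_tri {α : Type} {p q s : List α} (hp : p <+: s) (hq : q <+: s) :
    p <+: q ∨ q <+: p := by
  rcases le_total p.length q.length with h | h
  · exact Or.inl (List.prefix_of_prefix_length_le hp hq h)
  · exact Or.inr (List.prefix_of_prefix_length_le hq hp h)

-- hence two incomparable literal prefixes cannot both match the same string
theorem pv_sw_incompat (s p q : String) (hp : PySem.Str.startswith s p = true)
    (hq : PySem.Str.startswith s q = true)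
    (h : ¬ (p.toList <+: q.toList ∨ q.toList <+: p.toList)) : False := by
  rw [PySem.Str.startswith_eq, PySem.Chars.startswith_iff] at hp hq
  exact h (pv_prefix_tri hp hq)

-- ===== VERDICT (by name: the statement is the Claim_ definition above) =====
theorem detect_provider_from_key_py_spec : Claim_equal_detect_provider_from_key_py := by
  intro s _
  unfold Spec_detect_provider_from_key_py detect_provider_from_key_py detect_provider_from_key_py_alt
  by_cases hs : s = ""
  · simp [hs]
  · simp only [hs, if_false]
    by_cases hsk : PySem.Str.startswith s "sk-" = true
    · have hgsk : ¬ PySem.Str.startswith s "gsk_" = true := fun h =>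
        pv_sw_incompat s "sk-" "gsk_" hsk h (by decide)
      have hxai : ¬ PySem.Str.startswith s "xai-" = true := fun h =>
        pv_sw_incompat s "sk-" "xai-" hsk h (by decide)
      have hpplx : ¬ PySem.Str.startswith s "pplx-" = true := fun h =>
        pv_sw_incompat s "sk-" "pplx-" hsk h (by decide)
      have hr8 : ¬ PySem.Str.startswith s "r8_" = true := fun h =>
        pv_sw_incompat s "sk-" "r8_" hsk h (by decide)
      by_cases hant : PySem.Str.startswith s "sk-ant-" = true
      · have hor : ¬ PySem.Str.startswith s "sk-or-" = true := fun h =>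
          pv_sw_incompat s "sk-ant-" "sk-or-" hant h (by decide)
        have hproj : ¬ PySem.Str.startswith s "sk-proj-" = true := fun h =>
          pv_sw_incompat s "sk-ant-" "sk-proj-" hant h (by decide)
        simp only [PySem.Str.startswith_eq] at *
        simp at hsk hgsk hxai hpplx hr8 hant hor hproj
        simp [pvPrefixesA, pvPairsB, pvFirstMatch, hsk, hgsk, hxai, hpplx, hr8, hant, hor, hproj, PySem.List.max?, PySem.Str.len]
        try decide
      · by_cases hor : PySem.Str.startswith s "sk-or-" = true
        · have hproj : ¬ PySem.Str.startswith s "sk-proj-" = true := fun h =>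
            pv_sw_incompat s "sk-or-" "sk-proj-" hor h (by decide)
          simp only [PySem.Str.startswith_eq] at *
          simp at hsk hgsk hxai hpplx hr8 hant hor hproj
          simp [pvPrefixesA, pvPairsB, pvFirstMatch, hsk, hgsk, hxai, hpplx, hr8, hant, hor, hproj, PySem.List.max?, PySem.Str.len]
          try decide
        · by_cases hproj : PySem.Str.startswith s "sk-proj-" = true
          · simp only [PySem.Str.startswith_eq] at *
            simp at hsk hgsk hxai hpplx hr8 hant hor hproj
            simp [pvPrefixesA, pvPairsB, pvFirstMatch, hsk, hgsk, hxai, hpplx, hr8, hant, hor, hproj, PySem.List.max?, PySem.Str.len]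
            try decide
          · simp only [PySem.Str.startswith_eq] at *
            simp at hsk hgsk hxai hpplx hr8 hant hor hproj
            simp [pvPrefixesA, pvPairsB, pvFirstMatch, hsk, hgsk, hxai, hpplx, hr8, hant, hor, hproj, PySem.List.max?, PySem.Str.len]
            try decide
    · have hant : ¬ PySem.Str.startswith s "sk-ant-" = true := fun h =>
        hsk (pv_sw_of_prefix s "sk-ant-" "sk-" h (by decide))
      have hor : ¬ PySem.Str.startswith s "sk-or-" = true := fun h =>
        hsk (pv_sw_of_prefix s "sk-or-" "sk-" h (by decide))
      have hproj : ¬ PySem.Str.startswith s "sk-proj-" = true := fun h =>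
        hsk (pv_sw_of_prefix s "sk-proj-" "sk-" h (by decide))
      by_cases hgsk : PySem.Str.startswith s "gsk_" = true
      · have hxai : ¬ PySem.Str.startswith s "xai-" = true := fun h =>
          pv_sw_incompat s "gsk_" "xai-" hgsk h (by decide)
        have hpplx : ¬ PySem.Str.startswith s "pplx-" = true := fun h =>
          pv_sw_incompat s "gsk_" "pplx-" hgsk h (by decide)
        have hr8 : ¬ PySem.Str.startswith s "r8_" = true := fun h =>
          pv_sw_incompat s "gsk_" "r8_" hgsk h (by decide)
        simp only [PySem.Str.startswith_eq] at *
        simp at hsk hgsk hxai hpplx hr8 hant hor hproj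
        simp [pvPrefixesA, pvPairsB, pvFirstMatch, hsk, hgsk, hxai, hpplx, hr8, hant, hor, hproj, PySem.List.max?, PySem.Str.len]
        try decide
      · by_cases hxai : PySem.Str.startswith s "xai-" = true
        · have hpplx : ¬ PySem.Str.startswith s "pplx-" = true := fun h =>
            pv_sw_incompat s "xai-" "pplx-" hxai h (by decide)
          have hr8 : ¬ PySem.Str.startswith s "r8_" = true := fun h =>
            pv_sw_incompat s "xai-" "r8_" hxai h (by decide)
          simp only [PySem.Str.startswith_eq] at *
          simp at hsk hgsk hxai hpplx hr8 hant hor hproj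
          simp [pvPrefixesA, pvPairsB, pvFirstMatch, hsk, hgsk, hxai, hpplx, hr8, hant, hor, hproj, PySem.List.max?, PySem.Str.len]
          try decide
        · by_cases hpplx : PySem.Str.startswith s "pplx-" = true
          · have hr8 : ¬ PySem.Str.startswith s "r8_" = true := fun h =>
              pv_sw_incompat s "pplx-" "r8_" hpplx h (by decide)
            simp only [PySem.Str.startswith_eq] at *
            simp at hsk hgsk hxai hpplx hr8 hant hor hproj
            simp [pvPrefixesA, pvPairsB, pvFirstMatch, hsk, hgsk, hxai, hpplx, hr8, hant, hor, hproj, PySem.List.max?, PySem.Str.len]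
            try decide
          · by_cases hr8 : PySem.Str.startswith s "r8_" = true
            · simp only [PySem.Str.startswith_eq] at *
              simp at hsk hgsk hxai hpplx hr8 hant hor hproj
              simp [pvPrefixesA, pvPairsB, pvFirstMatch, hsk, hgsk, hxai, hpplx, hr8, hant, hor, hproj, PySem.List.max?, PySem.Str.len]
              try decide
            · simp only [PySem.Str.startswith_eq] at *
              simp at hsk hgsk hxai hpplx hr8 hant hor hproj
              simp [pvPrefixesA, pvPairsB, pvFirstMatch, hsk, hgsk, hxai, hpplx, hr8, hant, hor, hproj, PySem.List.max?, PySem.Str.len]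
              try decide
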